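-- pv_equiv track=rewrite | github.com/tosurajitc/mortgage-lending-mvp | src/semantic_kernel/plugins/customer_plugin/customer_communicator.py | _categorize_inquiry
-- ===== SOURCE A (Python) =====
-- def _categorize_inquiry(inquiry_text: str) -> str:
--     """Categorize the type of customer inquiry."""
--     inquiry_lower = inquiry_text.lower()
--
--     # Check for status update requests
--     if any(phrase in inquiry_lower for phrase in [
--         "status", "update", "progress", "where is", "how is", "what's happening"
--     ]):
--         return "status_update"
--
--     # Check for document questions
--     if any(phrase in inquiry_lower for phrase in [
--         "document", "paperwork", "upload", "submit", "send", "form", "proof", "statement"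
--     ]):
--         return "document_question"
--
--     # Check for timeline questions
--     if any(phrase in inquiry_lower for phrase in [
--         "how long", "when will", "timeline", "time frame", "schedule", "next step", "process"
--     ]):
--         return "timeline_question"
--
--     # Check for term explanation requests
--     if any(phrase in inquiry_lower for phrase in [
--         "what is", "what does", "explain", "mean", "definition", "understand"
--     ]):
--         return "term_explanation"
--
--     # Check for rate questions
--     if any(phrase in inquiry_lower for phrase in [
--         "rate", "interest", "apr", "percentage", "points", "lock"
--     ]):
--         return "rate_question"
--
--     # Default to general inquiry
--     return "general_inquiry"
-- ===== SOURCE B (Python) =====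
-- _NAMES = ["status_update", "document_question", "timeline_question",
--           "term_explanation", "rate_question", "general_inquiry"]
--
-- # One flat (phrase, priority) table; priority = index of the category in _NAMES.
-- _PHRASES = [
--     ("status", 0), ("update", 0), ("progress", 0), ("where is", 0),
--     ("how is", 0), ("what's happening", 0),
--     ("document", 1), ("paperwork", 1), ("upload", 1), ("submit", 1),
--     ("send", 1), ("form", 1), ("proof", 1), ("statement", 1),
--     ("how long", 2), ("when will", 2), ("timeline", 2), ("time frame", 2),
--     ("schedule", 2), ("next step", 2), ("process", 2),
--     ("what is", 3), ("what does", 3), ("explain", 3), ("mean", 3),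
--     ("definition", 3), ("understand", 3),
--     ("rate", 4), ("interest", 4), ("apr", 4), ("percentage", 4),
--     ("points", 4), ("lock", 4),
-- ]
--
--
-- def _categorize_inquiry(inquiry_text: str) -> str:
--     """Categorize the inquiry: best (smallest) priority of any matching phrase."""
--     low = inquiry_text.lower()
--     best = 5  # priority of 'general_inquiry'
--     for phrase, pri in _PHRASES:
--         if phrase in low:
--             best = min(best, pri)
--     return _NAMES[best]
-- ===== Notes on version B (the rewrite author's own statement) =====
-- stated objective: alternative
-- what changed: Replaces the five short-circuiting per-category branches by a single pass over one flat (phrase, priority) table that folds a min-priority accumulator over every phrase and indexes the category name by the resulting best priority.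
import Mathlib
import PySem

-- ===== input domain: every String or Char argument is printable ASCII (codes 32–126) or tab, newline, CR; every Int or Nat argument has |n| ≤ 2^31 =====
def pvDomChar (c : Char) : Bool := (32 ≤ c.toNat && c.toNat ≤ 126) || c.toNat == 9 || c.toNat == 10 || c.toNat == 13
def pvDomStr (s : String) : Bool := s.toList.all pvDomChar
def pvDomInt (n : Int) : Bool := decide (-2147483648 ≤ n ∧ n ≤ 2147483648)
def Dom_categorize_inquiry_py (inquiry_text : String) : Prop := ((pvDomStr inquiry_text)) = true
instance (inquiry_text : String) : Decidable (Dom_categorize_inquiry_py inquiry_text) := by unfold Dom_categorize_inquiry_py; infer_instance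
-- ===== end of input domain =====

-- B replaces A's five short-circuiting category branches by a single min-priority fold
-- over one flat (phrase, priority) table; same cost, a different (alternative) decomposition.

-- ===== PORT A =====
def categorize_inquiry_py (inquiry_text : String) : String :=
  let inquiry_lower := PySem.Str.lower inquiry_text
  if ["status", "update", "progress", "where is", "how is", "what's happening"].any
      (fun phrase => PySem.Str.isIn phrase inquiry_lower) then "status_update"
  else if ["document", "paperwork", "upload", "submit", "send", "form", "proof", "statement"].any
      (fun phrase => PySem.Str.isIn phrase inquiry_lower) then "document_question"
  else if ["how long", "when will", "timeline", "time frame", "schedule", "next step", "process"].any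
      (fun phrase => PySem.Str.isIn phrase inquiry_lower) then "timeline_question"
  else if ["what is", "what does", "explain", "mean", "definition", "understand"].any
      (fun phrase => PySem.Str.isIn phrase inquiry_lower) then "term_explanation"
  else if ["rate", "interest", "apr", "percentage", "points", "lock"].any
      (fun phrase => PySem.Str.isIn phrase inquiry_lower) then "rate_question"
  else "general_inquiry"

-- ===== PORT B =====
def pvNames : List String :=
  ["status_update", "document_question", "timeline_question",
   "term_explanation", "rate_question", "general_inquiry"]

def pvPhrases : List (String × Nat) :=
  [("status", 0), ("update", 0), ("progress", 0), ("where is", 0),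
   ("how is", 0), ("what's happening", 0),
   ("document", 1), ("paperwork", 1), ("upload", 1), ("submit", 1),
   ("send", 1), ("form", 1), ("proof", 1), ("statement", 1),
   ("how long", 2), ("when will", 2), ("timeline", 2), ("time frame", 2),
   ("schedule", 2), ("next step", 2), ("process", 2),
   ("what is", 3), ("what does", 3), ("explain", 3), ("mean", 3),
   ("definition", 3), ("understand", 3),
   ("rate", 4), ("interest", 4), ("apr", 4), ("percentage", 4),
   ("points", 4), ("lock", 4)]

def categorize_inquiry_py_alt (inquiry_text : String) : String :=
  let low := PySem.Str.lower inquiry_text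
  let best := pvPhrases.foldl
    (fun b pp => if PySem.Str.isIn pp.1 low then min b pp.2 else b) 5
  pvNames.getD best "general_inquiry"

-- ===== PRECONDITION & SPEC =====
def Spec_categorize_inquiry_py (inquiry_text : String) (out : String) : Prop := out = categorize_inquiry_py_alt inquiry_text
instance (inquiry_text : String) (out : String) : Decidable (Spec_categorize_inquiry_py inquiry_text out) := by unfold Spec_categorize_inquiry_py; infer_instance

-- ===== CLAIM (what is proved, stated in full; the proofs are below) =====
def Claim_equal_categorize_inquiry_py : Prop := ∀ (inquiry_text : String), Dom_categorize_inquiry_py inquiry_text → Spec_categorize_inquiry_py inquiry_text (categorize_inquiry_py inquiry_text)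

-- ===== LEMMAS AND PROOFS =====

-- Folding the min-priority accumulator over one category's block (all phrases with the
-- same priority p) updates b to 'min b p' exactly when some phrase of the block matches.
theorem pv_fold_block (low : String) (ps : List String) (p b : Nat) :
    List.foldl (fun b pp => if PySem.Str.isIn pp.1 low then min b pp.2 else b) b
      (ps.map (fun s => (s, p)))
      = if ps.any (fun s => PySem.Str.isIn s low) then min b p else b := by
  induction ps generalizing b with
  | nil => simp
  | cons hd tl ih =>
    simp only [List.map, List.foldl, List.any_cons]
    simp only [PySem.Str.isIn] at ih
    by_cases h : PySem.Chars.isIn hd.toList low.toList = true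
    · simp only [PySem.Str.isIn, h, Bool.true_or, if_pos, ih]
      split <;> omega
    · simp [PySem.Str.isIn, h, ih]

theorem categorize_inquiry_py_spec' (s : String) :
    categorize_inquiry_py s = categorize_inquiry_py_alt s := by
  unfold categorize_inquiry_py categorize_inquiry_py_alt
  have hsplit : pvPhrases =
      (["status", "update", "progress", "where is", "how is", "what's happening"].map (fun t => (t, 0)))
      ++ (["document", "paperwork", "upload", "submit", "send", "form", "proof", "statement"].map (fun t => (t, 1)))
      ++ (["how long", "when will", "timeline", "time frame", "schedule", "next step", "process"].map (fun t => (t, 2)))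
      ++ (["what is", "what does", "explain", "mean", "definition", "understand"].map (fun t => (t, 3)))
      ++ (["rate", "interest", "apr", "percentage", "points", "lock"].map (fun t => (t, 4))) := by rfl
  rw [hsplit]
  simp only [List.foldl_append, pv_fold_block]
  cases h1 : (["status", "update", "progress", "where is", "how is", "what's happening"].any
      (fun phrase => PySem.Str.isIn phrase (PySem.Str.lower s))) <;>
  cases h2 : (["document", "paperwork", "upload", "submit", "send", "form", "proof", "statement"].any
      (fun phrase => PySem.Str.isIn phrase (PySem.Str.lower s))) <;>
  cases h3 : (["how long", "when will", "timeline", "time frame", "schedule", "next step", "process"].any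
      (fun phrase => PySem.Str.isIn phrase (PySem.Str.lower s))) <;>
  cases h4 : (["what is", "what does", "explain", "mean", "definition", "understand"].any
      (fun phrase => PySem.Str.isIn phrase (PySem.Str.lower s))) <;>
  cases h5 : (["rate", "interest", "apr", "percentage", "points", "lock"].any
      (fun phrase => PySem.Str.isIn phrase (PySem.Str.lower s))) <;>
  simp [pvNames]

-- ===== VERDICT (by name: the statement is the Claim_ definition above) =====
theorem categorize_inquiry_py_spec : Claim_equal_categorize_inquiry_py := by
  intro s _
  exact categorize_inquiry_py_spec' s
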